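-- pv_equiv track=rewrite | github.com/paiml/depyler | examples/hard_numeric_patterns.py | floor_log10
-- ===== SOURCE A (Python) =====
-- def floor_log10(n: int) -> int:
--     """Floor of log base 10."""
--     if n <= 0:
--         return -1
--     result: int = 0
--     val: int = n
--     while val >= 10:
--         val = val // 10
--         result = result + 1
--     return result
-- ===== SOURCE B (Python) =====
-- def floor_log10(n: int) -> int:
--     """Floor of log base 10 via the decimal string length instead of a division loop."""
--     if n <= 0:
--         return -1
--     return len(str(n)) - 1
-- ===== Notes on version B (the rewrite author's own statement) =====
-- stated objective: simpler
-- what changed: Replaced the repeated-division counting loop with a loop-free computation: for positive n, B returns the length of the decimal string representation minus one.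
import Mathlib
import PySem

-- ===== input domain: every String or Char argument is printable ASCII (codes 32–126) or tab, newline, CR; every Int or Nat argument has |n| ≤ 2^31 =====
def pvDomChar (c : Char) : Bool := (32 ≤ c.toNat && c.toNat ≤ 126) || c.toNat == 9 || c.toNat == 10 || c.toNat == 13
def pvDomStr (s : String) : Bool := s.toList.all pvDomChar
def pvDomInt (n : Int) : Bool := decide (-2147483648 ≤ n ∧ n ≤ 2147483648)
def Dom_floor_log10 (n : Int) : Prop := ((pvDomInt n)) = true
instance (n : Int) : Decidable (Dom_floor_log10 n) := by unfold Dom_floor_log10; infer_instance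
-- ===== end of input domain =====

-- B replaces A's repeated-division counting loop with len(str(n)) - 1 (simpler, loop-free).

-- ===== PORT A =====
-- the `while val >= 10` loop of A, carrying (val, result)
def floorLog10Loop (val : Int) (result : Int) : Int :=
  if h : 10 ≤ val then
    floorLog10Loop (PySem.Int.floordiv val 10) (result + 1)
  else
    result
termination_by val.toNat
decreasing_by
  rw [show PySem.Int.floordiv val 10 = val / 10 from
    Int.fdiv_eq_ediv_of_nonneg _ (by norm_num)]
  omega

def floor_log10 (n : Int) : Int :=
  if n ≤ 0 then -1
  else floorLog10Loop n 0

-- ===== PORT B =====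
def floor_log10_alt (n : Int) : Int :=
  if n ≤ 0 then -1
  else PySem.Str.len (PySem.Int.toStr n) - 1

-- ===== PRECONDITION & SPEC =====
def Spec_floor_log10 (n : Int) (out : Int) : Prop := out = floor_log10_alt n
instance (n : Int) (out : Int) : Decidable (Spec_floor_log10 n out) := by unfold Spec_floor_log10; infer_instance

-- ===== CLAIM (what is proved, stated in full; the proofs are below) =====
def Claim_equal_floor_log10 : Prop := ∀ (n : Int), Dom_floor_log10 n → Spec_floor_log10 n (floor_log10 n)

-- ===== LEMMAS AND PROOFS =====

-- A's loop computes result + log₁₀ val for positive val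
lemma floorLog10Loop_eq_log_aux : ∀ (k : ℕ) (val result : Int), val.toNat = k → 1 ≤ val →
    floorLog10Loop val result = result + (Nat.log 10 val.toNat : Int) := by
  intro k
  induction k using Nat.strong_induction_on with
  | _ k ih =>
    intro val result hk h1
    by_cases h10 : 10 ≤ val
    · rw [floorLog10Loop.eq_def]
      rw [dif_pos h10]
      have h1' : (1 : Int) ≤ PySem.Int.floordiv val 10 := by
        rw [show PySem.Int.floordiv val 10 = val / 10 from Int.fdiv_eq_ediv_of_nonneg _ (by norm_num)]; omega
      have hlt : (PySem.Int.floordiv val 10).toNat < k := by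
        rw [show PySem.Int.floordiv val 10 = val / 10 from Int.fdiv_eq_ediv_of_nonneg _ (by norm_num)]; omega
      rw [ih _ hlt _ _ rfl h1']
      have hdiv : (PySem.Int.floordiv val 10).toNat = val.toNat / 10 := by
        rw [show PySem.Int.floordiv val 10 = val / 10 from Int.fdiv_eq_ediv_of_nonneg _ (by norm_num)]; omega
      have hlog : Nat.log 10 (val.toNat / 10) = Nat.log 10 val.toNat - 1 :=
        Nat.log_div_base 10 val.toNat
      have hpos : 0 < Nat.log 10 val.toNat :=
        Nat.log_pos (by norm_num) (by omega)
      rw [hdiv, hlog]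
      omega
    · rw [floorLog10Loop.eq_def]
      rw [dif_neg h10]
      have : Nat.log 10 val.toNat = 0 := Nat.log_eq_zero_iff.mpr (Or.inl (by omega))
      simp [this]

lemma floorLog10Loop_eq_log (val result : Int) (h : 1 ≤ val) :
    floorLog10Loop val result = result + (Nat.log 10 val.toNat : Int) :=
  floorLog10Loop_eq_log_aux val.toNat val result rfl h

-- with enough fuel, toDigitsCore produces log₁₀ m + 1 digits on top of the accumulator
lemma toDigitsCore_len (f : ℕ) : ∀ (m : ℕ) (l : List Char), m < f → 0 < m →
    (Nat.toDigitsCore 10 f m l).length = Nat.log 10 m + 1 + l.length := by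
  induction f with
  | zero => intro m l hm; omega
  | succ f ih =>
    intro m l hm hpos
    rw [Nat.toDigitsCore]
    by_cases h10 : m / 10 = 0
    · have hlt : m < 10 := by omega
      have : Nat.log 10 m = 0 := Nat.log_eq_zero_iff.mpr (Or.inl hlt)
      simp [h10, this]
      omega
    · rw [if_neg h10]
      have hge : 10 ≤ m := by
        by_contra hc
        exact h10 (Nat.div_eq_of_lt (by omega))
      have hdivlt : m / 10 < f := by
        have : m / 10 < m := Nat.div_lt_self hpos (by norm_num)
        omega
      rw [ih (m / 10) _ hdivlt (by omega)]
      have hlog : Nat.log 10 (m / 10) = Nat.log 10 m - 1 := Nat.log_div_base 10 m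
      have hposlog : 0 < Nat.log 10 m := Nat.log_pos (by norm_num) hge
      simp only [List.length_cons]
      omega

-- for positive n, str(n) has log₁₀ n + 1 characters
lemma toChars_length (n : Int) (h : 1 ≤ n) :
    (PySem.Int.toChars n).length = Nat.log 10 n.toNat + 1 := by
  simp only [PySem.Int.toChars, if_neg (by omega : ¬ n < 0), Nat.toDigits]
  simpa using toDigitsCore_len (n.toNat + 1) n.toNat [] (by omega) (by omega)

-- ===== VERDICT (by name: the statement is the Claim_ definition above) =====
theorem floor_log10_spec : Claim_equal_floor_log10 := by
  intro n _
  unfold Spec_floor_log10 floor_log10 floor_log10_alt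
  by_cases h : n ≤ 0
  · simp [h]
  · rw [if_neg h, if_neg h]
    have h1 : (1 : Int) ≤ n := by omega
    rw [floorLog10Loop_eq_log n 0 h1]
    simp only [PySem.Str.len]
    rw [PySem.Int.toList_toStr, toChars_length n h1]
    push_cast
    ring
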